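-- pv_equiv track=rewrite | github.com/Nemesix493/Projet-4-ChessTournament | contollers/swisstournament.py | calc_priority
-- ===== SOURCE A (Python) =====
-- def calc_priority(player_tournament_rank: int,
--                   players_number: int) -> list[int]:
--     priorities = []
--     for i in range(players_number - 1):
--         if i % 2 == 0:
--             priorities.append(
--                 (player_tournament_rank + players_number // 2 - i // 2)
--                 % players_number
--             )
--         else:
--             priorities.append(
--                 (
--                     player_tournament_rank + players_number // 2 +
--                     (i + 1) // 2
--                 )
--                 % players_number
--             )
--     return priorities
-- ===== SOURCE B (Python) =====
-- def calc_priority(player_tournament_rank: int,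
--                   players_number: int) -> list[int]:
--     n = players_number
--     m = n - 1                      # number of priorities to produce
--     if m <= 0:
--         return []
--     base = player_tournament_rank + n // 2
--     # staged passes: the descending half-sequence and the ascending half-sequence
--     downs = [(base - k) % n for k in range((m + 1) // 2)]
--     ups = [(base + k) % n for k in range(1, m // 2 + 1)]
--     # interleave them: down, up, down, up, ...
--     out = []
--     for d, u in zip(downs, ups):
--         out += [d, u]
--     if m % 2 == 1:                 # odd count: the last down has no partner
--         out.append(downs[-1])
--     return out
-- ===== Notes on version B (the rewrite author's own statement) =====
-- stated objective: alternative
-- what changed: B builds the answer in staged passes: two list comprehensions produce the descending half-sequence (base-k)%n and the ascending half-sequence (base+k)%n separately, and a final pass interleaves them with zip (appending the unpaired last descending element when n-1 is odd), instead of A's single indexed loop with a parity branch per element.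
import Mathlib
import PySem

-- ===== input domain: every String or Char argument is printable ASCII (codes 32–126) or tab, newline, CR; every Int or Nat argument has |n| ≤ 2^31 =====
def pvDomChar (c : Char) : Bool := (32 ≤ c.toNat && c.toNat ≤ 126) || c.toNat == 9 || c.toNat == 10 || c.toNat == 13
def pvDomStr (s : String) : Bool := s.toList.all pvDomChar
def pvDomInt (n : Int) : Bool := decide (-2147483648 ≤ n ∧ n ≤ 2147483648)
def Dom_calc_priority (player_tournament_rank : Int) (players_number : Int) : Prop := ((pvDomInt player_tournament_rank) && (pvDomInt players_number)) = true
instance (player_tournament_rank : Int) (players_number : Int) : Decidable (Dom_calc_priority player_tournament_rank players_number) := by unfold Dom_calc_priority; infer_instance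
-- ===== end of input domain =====

-- B builds the two half-sequences (base-k)%n and (base+k)%n in separate comprehension
-- passes and then interleaves them with zip (plus the unpaired last element when n-1 is
-- odd), instead of A's single indexed loop with a per-element parity branch;
-- objective: alternative decomposition (same cost).

-- ===== PORT A =====
def calc_priority (player_tournament_rank : Int) (players_number : Int) : List Int :=
  (PySem.List.pyRange 0 (players_number - 1) 1).foldl
    (fun priorities i =>
      if PySem.Int.mod i 2 = 0 then
        priorities ++ [PySem.Int.mod
          (player_tournament_rank + PySem.Int.floordiv players_number 2 - PySem.Int.floordiv i 2)
          players_number]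
      else
        priorities ++ [PySem.Int.mod
          (player_tournament_rank + PySem.Int.floordiv players_number 2 + PySem.Int.floordiv (i + 1) 2)
          players_number])
    []

-- ===== PORT B =====
def calc_priority_alt (player_tournament_rank : Int) (players_number : Int) : List Int :=
  let n := players_number
  let m := n - 1
  if m ≤ 0 then []
  else
    let base := player_tournament_rank + PySem.Int.floordiv n 2
    let downs := (PySem.List.pyRange 0 (PySem.Int.floordiv (m + 1) 2) 1).map
      (fun k => PySem.Int.mod (base - k) n)
    let ups := (PySem.List.pyRange 1 (PySem.Int.floordiv m 2 + 1) 1).map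
      (fun k => PySem.Int.mod (base + k) n)
    let out := (downs.zip ups).foldl (fun acc p => acc ++ [p.1, p.2]) []
    -- downs[-1]: downs is nonempty here, so pyGet? is some; .getD 0 only totalises
    if PySem.Int.mod m 2 = 1 then out ++ [(PySem.List.pyGet? downs (-1)).getD 0] else out

-- ===== PRECONDITION & SPEC =====
def Spec_calc_priority (player_tournament_rank : Int) (players_number : Int) (out : List Int) : Prop := out = calc_priority_alt player_tournament_rank players_number
instance (player_tournament_rank : Int) (players_number : Int) (out : List Int) : Decidable (Spec_calc_priority player_tournament_rank players_number out) := by unfold Spec_calc_priority; infer_instance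

-- ===== CLAIM (what is proved, stated in full; the proofs are below) =====
def Claim_equal_calc_priority : Prop := ∀ (player_tournament_rank : Int) (players_number : Int), Dom_calc_priority player_tournament_rank players_number → Spec_calc_priority player_tournament_rank players_number (calc_priority player_tournament_rank players_number)

-- ===== LEMMAS AND PROOFS =====

lemma range_add_two (m : Nat) :
    List.range (m + 2) = 0 :: 1 :: (List.range m).map (fun j => j + 2) := by
  rw [List.range_succ_eq_map, List.range_succ_eq_map]
  simp [List.map_map, Function.comp]

-- interleaving two half-sequences of maps over ranges equals one map with a parity split
lemma zip_flat_interleave :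
    ∀ (M : Nat) (f g : Nat → Int),
      (((List.range ((M + 1) / 2)).map f).zip ((List.range (M / 2)).map g)).flatMap
          (fun p => [p.1, p.2])
        ++ (if M % 2 = 1 then [f (M / 2)] else [])
      = (List.range M).map (fun j => if j % 2 = 0 then f (j / 2) else g (j / 2)) := by
  intro M
  induction M using Nat.strong_induction_on with
  | _ M ih =>
    match M with
    | 0 => intro f g; simp
    | 1 => intro f g; simp [List.range_succ]
    | M + 2 =>
      intro f g
      have h1 : (M + 2 + 1) / 2 = (M + 1) / 2 + 1 := by omega
      have h2 : (M + 2) / 2 = M / 2 + 1 := by omega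
      have hmod : (M + 2) % 2 = M % 2 := by omega
      rw [h1, h2, hmod, List.range_succ_eq_map, List.range_succ_eq_map, List.map_cons,
        List.map_cons, List.map_map, List.map_map, List.zip_cons_cons, List.flatMap_cons]
      have htrail : (if M % 2 = 1 then [f (M / 2 + 1)] else [])
          = (if M % 2 = 1 then [(f ∘ Nat.succ) (M / 2)] else []) := by
        split <;> rfl
      rw [List.append_assoc, htrail, ih M (by omega) (f ∘ Nat.succ) (g ∘ Nat.succ),
        range_add_two, List.map_cons, List.map_cons, List.map_map]
      simp only [List.cons_append, List.nil_append]
      refine congrArg₂ _ rfl (congrArg₂ _ rfl ?_)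
      apply List.map_congr_left
      intro j _
      simp only [Function.comp]
      have he : (j + 2) % 2 = j % 2 := by omega
      have hq : (j + 2) / 2 = j / 2 + 1 := by omega
      rw [he, hq]

-- A's per-index emitted value, on natural indices
def gNat (base n : Int) (i : Nat) : Int :=
  if i % 2 = 0 then PySem.Int.mod (base - (i / 2 : Nat)) n
  else PySem.Int.mod (base + ((i + 1) / 2 : Nat)) n

lemma gNat_eq_g (base n : Int) (i : Nat) :
    gNat base n i
      = (if PySem.Int.mod (i : Int) 2 = 0 then
          PySem.Int.mod (base - PySem.Int.floordiv (i : Int) 2) n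
        else
          PySem.Int.mod (base + PySem.Int.floordiv ((i : Int) + 1) 2) n) := by
  have h2 : PySem.Int.mod (i : Int) 2 = ((i % 2 : Nat) : Int) := PySem.Int.mod_natCast i 2
  have hd : PySem.Int.floordiv (i : Int) 2 = ((i / 2 : Nat) : Int) := PySem.Int.floordiv_natCast i 2
  have hd1 : PySem.Int.floordiv ((i : Int) + 1) 2 = (((i + 1) / 2 : Nat) : Int) := by
    have := PySem.Int.floordiv_natCast (i + 1) 2
    push_cast at this ⊢
    exact this
  rw [gNat, h2, hd, hd1]
  by_cases h : i % 2 = 0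
  · simp [h]
  · simp [h]
    intro hdvd
    exfalso
    omega

-- ===== VERDICT (by name: the statement is the Claim_ definition above) =====
theorem calc_priority_spec : Claim_equal_calc_priority := by
  intro r n _
  unfold Spec_calc_priority calc_priority calc_priority_alt
  set base := r + PySem.Int.floordiv n 2 with hbase
  -- A as a map of gNat over List.range
  have hA : (PySem.List.pyRange 0 (n - 1) 1).foldl
      (fun priorities i =>
        if PySem.Int.mod i 2 = 0 then
          priorities ++ [PySem.Int.mod (base - PySem.Int.floordiv i 2) n]
        else
          priorities ++ [PySem.Int.mod (base + PySem.Int.floordiv (i + 1) 2) n]) []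
      = (List.range (n - 1).toNat).map (fun j => gNat base n j) := by
    have hfold := PySem.List.foldl_append_singleton_eq_map
      (l := PySem.List.pyRange 0 (n - 1) 1)
      (f := fun i => if PySem.Int.mod i 2 = 0 then
          PySem.Int.mod (base - PySem.Int.floordiv i 2) n
        else
          PySem.Int.mod (base + PySem.Int.floordiv (i + 1) 2) n)
      (acc := [])
    rw [List.nil_append] at hfold
    have hcongr : (PySem.List.pyRange 0 (n - 1) 1).foldl
        (fun priorities i =>
          if PySem.Int.mod i 2 = 0 then
            priorities ++ [PySem.Int.mod (base - PySem.Int.floordiv i 2) n]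
          else
            priorities ++ [PySem.Int.mod (base + PySem.Int.floordiv (i + 1) 2) n]) []
        = (PySem.List.pyRange 0 (n - 1) 1).foldl
          (fun acc i => acc ++ [if PySem.Int.mod i 2 = 0 then
              PySem.Int.mod (base - PySem.Int.floordiv i 2) n
            else
              PySem.Int.mod (base + PySem.Int.floordiv (i + 1) 2) n]) [] := by
      apply PySem.List.foldl_congr_mem
      intro acc i _
      exact (apply_ite (fun v => acc ++ [v]) (PySem.Int.mod i 2 = 0) _ _).symm
    rw [hcongr, hfold, PySem.List.pyRange_one, List.map_map]
    simp only [Int.sub_zero]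
    apply List.map_congr_left
    intro j _
    simp only [Function.comp, Int.zero_add]
    rw [gNat_eq_g]
  rw [hA]
  by_cases hn : n - 1 ≤ 0
  · have h0 : (n - 1).toNat = 0 := by omega
    rw [if_pos hn, h0, List.range_zero, List.map_nil]
  · simp only [if_neg hn]
    set M := (n - 1).toNat with hM
    have hMI : (n - 1 : Int) = (M : Int) := by omega
    set f : Nat → Int := fun k => PySem.Int.mod (base - k) n with hf
    set g : Nat → Int := fun k => PySem.Int.mod (base + (k + 1)) n with hg
    have hdc : PySem.Int.floordiv (n - 1 + 1) 2 = (((M + 1) / 2 : Nat) : Int) := by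
      rw [hMI]; exact_mod_cast PySem.Int.floordiv_natCast (M + 1) 2
    have huc : PySem.Int.floordiv (n - 1) 2 = ((M / 2 : Nat) : Int) := by
      rw [hMI]; exact_mod_cast PySem.Int.floordiv_natCast M 2
    have hdowns : (PySem.List.pyRange 0 (PySem.Int.floordiv (n - 1 + 1) 2) 1).map
        (fun k => PySem.Int.mod (base - k) n) = (List.range ((M + 1) / 2)).map f := by
      rw [hdc, PySem.List.pyRange_one, List.map_map]
      apply List.map_congr_left
      intro k _
      simp [hf]
    have hups : (PySem.List.pyRange 1 (PySem.Int.floordiv (n - 1) 2 + 1) 1).map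
        (fun k => PySem.Int.mod (base + k) n) = (List.range (M / 2)).map g := by
      rw [huc, PySem.List.pyRange_one, List.map_map]
      have hlen : ((M / 2 : Nat) : Int) + 1 - 1 = ((M / 2 : Nat) : Int) := by omega
      rw [hlen, Int.toNat_natCast]
      apply List.map_congr_left
      intro k _
      simp only [Function.comp, hg]
      congr 1
      omega
    rw [hdowns, hups, PySem.List.foldl_append_eq_flatMap, List.nil_append]
    have hMpos : 1 ≤ M := by omega
    have hmodm : PySem.Int.mod (n - 1) 2 = ((M % 2 : Nat) : Int) := by
      rw [hMI]; exact_mod_cast PySem.Int.mod_natCast M 2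
    -- B's interleaving, rephrased as the single parity-split map and bridged to gNat
    have hB := zip_flat_interleave M f g
    have hpoint : (List.range M).map (fun j => if j % 2 = 0 then f (j / 2) else g (j / 2))
        = (List.range M).map (fun j => gNat base n j) := by
      apply List.map_congr_left
      intro j _
      rw [gNat]
      split
      · rfl
      · simp only [hg]
        have hq : (j + 1) / 2 = j / 2 + 1 := by omega
        rw [hq]
        congr 1
    rw [hpoint] at hB
    rw [hmodm]
    by_cases hodd : M % 2 = 1
    · rw [if_pos (by exact_mod_cast hodd)]
      have hlast : (PySem.List.pyGet? ((List.range ((M + 1) / 2)).map f) (-1)).getD 0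
          = f (M / 2) := by
        rw [PySem.List.pyGet?_neg_one, List.getLast?_eq_getElem?]
        have hlen : ((List.range ((M + 1) / 2)).map f).length = (M + 1) / 2 := by simp
        rw [hlen]
        have hlt : (M + 1) / 2 - 1 < (M + 1) / 2 := by omega
        rw [List.getElem?_map, List.getElem?_range hlt]
        have he : (M + 1) / 2 - 1 = M / 2 := by omega
        simp [he]
      rw [hlast, ← hB, if_pos hodd]
    · rw [if_neg (by exact_mod_cast (by omega : ¬ ((M % 2 : Nat) : Int) = 1))]
      rw [← hB, if_neg hodd, List.append_nil]
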